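-- pv_equiv track=rewrite | github.com/LeifGuillermo/WordleCrusher | wordle_crusher/word_optimizer.py | get_char_ranks
-- ===== SOURCE A (Python) =====
-- def get_char_ranks(character_count_dict):
--     number_of_different_characters = len(character_count_dict)
--     character_ranks = create_rank_list(number_of_different_characters)
--
--     char_list = list(character_count_dict.keys())
--
--     character_rank_dict = dict()
--     for i in range(number_of_different_characters):
--         character_rank_dict[char_list[i]] = character_ranks[i]
--
--     return character_rank_dict
--
-- def create_rank_list(length):
--     return sorted([(i + 1) for i in range(length)], reverse=True)
-- ===== SOURCE B (Python) =====
-- def get_char_ranks(character_count_dict):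
--     # Walk the keys BACK-TO-FRONT with a counter that starts at 1, so the last
--     # key gets rank 1, then reverse the collected pairs to restore key order.
--     pairs = []
--     rank = 1
--     for ch in reversed(list(character_count_dict)):
--         pairs.append((ch, rank))
--         rank += 1
--     return dict(reversed(pairs))
-- ===== Notes on version B (the rewrite author's own statement) =====
-- stated objective: alternative
-- what changed: B replaces A's sorted()-built descending rank table and the range(n) indexing loop by a reverse traversal with an incrementing counter: it walks the keys back-to-front assigning ranks 1,2,... (no len(), no sort, no indexing) and reverses the collected pairs at the end.
import Mathlib
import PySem

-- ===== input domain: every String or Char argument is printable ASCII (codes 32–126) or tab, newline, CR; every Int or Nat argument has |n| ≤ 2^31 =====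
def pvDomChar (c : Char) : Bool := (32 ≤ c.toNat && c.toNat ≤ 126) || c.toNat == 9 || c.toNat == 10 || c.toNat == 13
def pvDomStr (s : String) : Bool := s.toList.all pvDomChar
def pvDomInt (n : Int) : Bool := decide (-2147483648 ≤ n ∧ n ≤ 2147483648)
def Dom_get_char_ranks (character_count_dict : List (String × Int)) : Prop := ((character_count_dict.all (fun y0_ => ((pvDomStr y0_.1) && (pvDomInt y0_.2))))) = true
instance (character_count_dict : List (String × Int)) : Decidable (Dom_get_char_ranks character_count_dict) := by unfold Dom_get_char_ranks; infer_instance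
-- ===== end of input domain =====

-- B drops A's sorted() rank table and range(n)/indexing loop: it walks the keys
-- back-to-front with a counter starting at 1 and reverses the collected pairs.

-- ===== PORT A =====
def create_rank_list (length : Int) : List Int :=
  PySem.List.sorted ((PySem.List.pyRange 0 length 1).map (fun i => i + 1)) (fun x => x) true

def get_char_ranks (character_count_dict : List (String × Int)) : List (String × Int) :=
  let number_of_different_characters : Int := character_count_dict.length
  let character_ranks := create_rank_list number_of_different_characters
  let char_list := character_count_dict.map Prod.fst
  let character_rank_dict : PySem.Dict String Int :=
    (PySem.List.pyRange 0 number_of_different_characters 1).foldl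
      (fun d i => d.insert (PySem.List.pyGetD char_list i "") (PySem.List.pyGetD character_ranks i 0))
      PySem.Dict.empty
  character_rank_dict.items

-- ===== PORT B =====
-- for ch in reversed(keys): pairs.append((ch, rank)); rank += 1 — then dict(reversed(pairs))
def get_char_ranks_alt (character_count_dict : List (String × Int)) : List (String × Int) :=
  let st := (character_count_dict.map Prod.fst).reverse.foldl
      (fun (st : List (String × Int) × Int) ch => (st.1 ++ [(ch, st.2)], st.2 + 1))
      (([] : List (String × Int)), (1 : Int))
  (PySem.Dict.ofList st.1.reverse).items

-- ===== PRECONDITION & SPEC =====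
-- Pre_ says the assoc list encodes a genuine Python dict (distinct keys); a list with
-- duplicate keys represents no input A's caller can pass, since dict keys are unique.
def Pre_get_char_ranks (character_count_dict : List (String × Int)) : Prop :=
  (character_count_dict.map Prod.fst).Nodup
instance (character_count_dict : List (String × Int)) : Decidable (Pre_get_char_ranks character_count_dict) := by unfold Pre_get_char_ranks; infer_instance
def pvWitness_get_char_ranks : (List (String × Int)) := [("a", 3), ("b", 1)]
def Spec_get_char_ranks (character_count_dict : List (String × Int)) (out : List (String × Int)) : Prop := out = get_char_ranks_alt character_count_dict
instance (character_count_dict : List (String × Int)) (out : List (String × Int)) : Decidable (Spec_get_char_ranks character_count_dict out) := by unfold Spec_get_char_ranks; infer_instance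

-- ===== CLAIM (what is proved, stated in full; the proofs are below) =====
def Claim_equal_get_char_ranks : Prop := ∀ (character_count_dict : List (String × Int)), Dom_get_char_ranks character_count_dict → Pre_get_char_ranks character_count_dict → Spec_get_char_ranks character_count_dict (get_char_ranks character_count_dict)

-- ===== LEMMAS AND PROOFS =====

-- A's rank list sorted([1..n], reverse=True) is the countdown range [n, n-1, …, 1].
theorem create_rank_list_eq (n : Nat) :
    create_rank_list (n : Int) = PySem.List.pyRange (n : Int) 0 (-1) := by
  unfold create_rank_list
  have h1 : ((PySem.List.pyRange 0 (n:Int) 1).map (fun i => i + 1))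
      = PySem.List.pyRange 1 ((n:Int)+1) 1 := by
    rw [PySem.List.pyRange_one 0, PySem.List.pyRange_one 1, List.map_map]
    have : ((n:Int) + 1 - 1).toNat = ((n:Int) - 0).toNat := by omega
    rw [this]
    exact List.map_congr_left (fun k _ => by simp [add_comm])
  apply PySem.List.sorted_rev_eq_of_perm_of_pairwise_gt
  · rw [PySem.List.pyRange_neg_one_eq_reverse, h1]
    norm_num
  · rw [PySem.List.pyRange_neg_one_eq_reverse]
    rw [List.pairwise_reverse]
    norm_num
    exact PySem.List.pairwise_lt_pyRange_one 1 ((n:Int)+1)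

-- A's 'for i in range(n)' indexing loop is the fold over the zipped (key, rank) pairs.
theorem fold_zip (ks : List String) : ∀ (rs : List Int) (d : PySem.Dict String Int),
    rs.length = ks.length →
    (PySem.List.pyRange 0 (ks.length:Int) 1).foldl
      (fun d i => d.insert (PySem.List.pyGetD ks i "") (PySem.List.pyGetD rs i 0)) d
    = (ks.zip rs).foldl (fun d p => d.insert p.1 p.2) d := by
  induction ks using List.reverseRecOn with
  | nil => intro rs d h; rw [List.length_eq_zero_iff.mp h]; rfl
  | append_singleton ks k ih =>
    intro rs d h
    rcases rs.eq_nil_or_concat with rfl | ⟨rs', r, rfl⟩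
    · simp at h
    simp only [List.concat_eq_append] at h ⊢
    simp only [List.length_append, List.length_singleton] at h
    have hlen : rs'.length = ks.length := by omega
    have hsr : ((ks ++ [k]).length : Int) = (ks.length : Int) + 1 := by simp
    rw [hsr, PySem.List.pyRange_one_succ_right (by positivity), List.foldl_append]
    rw [PySem.List.foldl_congr_mem _ _
      (fun d i => d.insert (PySem.List.pyGetD ks i "") (PySem.List.pyGetD rs' i 0)) d
      (fun acc i hi => by
        obtain ⟨h0, h1⟩ := PySem.List.mem_pyRange_one.mp hi
        beta_reduce
        rw [PySem.List.pyGetD_eq_getElem (ks ++ [k]) _ h0 (by simp; omega),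
            PySem.List.pyGetD_eq_getElem (rs' ++ [r]) _ h0 (by simp; omega),
            PySem.List.pyGetD_eq_getElem ks _ h0 (by omega),
            PySem.List.pyGetD_eq_getElem rs' _ h0 (by omega),
            List.getElem_append_left (by omega), List.getElem_append_left (by omega)])]
    rw [ih rs' d hlen]
    rw [List.zip_append (by omega), List.foldl_append]
    simp only [List.zip_cons_cons, List.zip_nil_right, List.foldl_cons, List.foldl_nil]
    congr 1
    · rw [PySem.List.pyGetD_eq_getElem _ _ (by positivity) (by simp),
        List.getElem_append_right (by simp)]
      simp
    · rw [PySem.List.pyGetD_eq_getElem _ _ (by positivity) (by simp [hlen]),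
        List.getElem_append_right (by simp [hlen])]
      simp [hlen]

-- Inserting fresh, pairwise-distinct keys appends: the dict's items are the pair list itself.
theorem items_fold (ks : List String) : ∀ (rs : List Int) (d : PySem.Dict String Int),
    rs.length = ks.length → (d.keys ++ ks).Nodup →
    ((ks.zip rs).foldl (fun d p => d.insert p.1 p.2) d).items = d.items ++ ks.zip rs := by
  induction ks with
  | nil => intro rs d h _; rw [List.length_eq_zero_iff.mp h]; simp
  | cons k ks ih =>
    intro rs d h hnd
    rcases rs with _ | ⟨r, rs⟩
    · simp at h
    simp only [List.zip_cons_cons, List.foldl_cons]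
    have hmem : k ∉ d.keys := fun hm =>
      (List.disjoint_of_nodup_append hnd) hm (List.mem_cons_self)
    have hk : d.contains k = false := by
      rcases hcon : d.contains k with _ | _
      · rfl
      · exact absurd ((PySem.Dict.contains_iff_mem_keys d k).mp hcon) hmem
    have hnd' : ((d.insert k r).keys ++ ks).Nodup := by
      rw [PySem.Dict.keys_insert_of_not_contains d r hk, List.append_assoc]
      simpa using hnd
    rw [ih rs (d.insert k r) (by simpa using h) hnd']
    rw [PySem.Dict.items_insert_of_not_contains d r hk]
    simp

-- B's counting loop over a list pairs its elements with the ascending range from the start rank.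
theorem foldl_count (ls : List String) : ∀ (acc : List (String × Int)) (r : Int),
    ls.foldl (fun (st : List (String × Int) × Int) ch => (st.1 ++ [(ch, st.2)], st.2 + 1)) (acc, r)
      = (acc ++ ls.zip (PySem.List.pyRange r (r + ls.length) 1), r + ls.length) := by
  induction ls with
  | nil => intro acc r; simp [PySem.List.pyRange]
  | cons x ls ih =>
    intro acc r
    simp only [List.foldl_cons]
    rw [ih (acc ++ [(x, r)]) (r + 1)]
    rw [List.length_cons,
      show r + (((ls.length + 1 : Nat)) : Int) = r + 1 + (ls.length : Int) from by push_cast; ring]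
    rw [PySem.List.pyRange_one_cons (a := r) (by omega)]
    simp [List.append_assoc]

-- Reversing a zip of equal-length lists zips the reverses.
theorem zip_reverse {α β : Type} (l : List α) (m : List β) (h : l.length = m.length) :
    (l.zip m).reverse = l.reverse.zip m.reverse := by
  induction l generalizing m with
  | nil => simp
  | cons x l ih =>
    rcases m with _ | ⟨y, m⟩
    · simp at h
    simp only [List.length_cons] at h
    simp only [List.zip_cons_cons, List.reverse_cons, ih m (by omega)]
    rw [List.zip_append (by simp; omega)]
    simp

-- ===== VERDICT (by name: the statement is the Claim_ definition above) =====
theorem get_char_ranks_spec : Claim_equal_get_char_ranks := by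
  intro ccd _ hpre
  unfold Spec_get_char_ranks get_char_ranks get_char_ranks_alt
  set ks := ccd.map Prod.fst with hks
  have hlenks : ks.length = ccd.length := by simp [hks]
  have hcrl : create_rank_list (ccd.length : Int) = PySem.List.pyRange (ccd.length : Int) 0 (-1) :=
    create_rank_list_eq ccd.length
  have hrlen : (PySem.List.pyRange (ks.length : Int) 0 (-1)).length = ks.length := by
    rw [PySem.List.length_pyRange_neg_one]; omega
  -- the target of both sides: the keys zipped with the countdown [n, …, 1]
  have hrangelen : (PySem.List.pyRange 1 ((ks.length : Int) + 1) 1).length = ks.length := by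
    rw [PySem.List.length_pyRange_one]; omega
  -- A's side
  simp only [hcrl]
  rw [show (ccd.length : Int) = (ks.length : Int) from by rw [hlenks]]
  rw [fold_zip ks _ PySem.Dict.empty hrlen]
  rw [items_fold ks _ PySem.Dict.empty hrlen
      (by rw [PySem.Dict.keys_empty]; simpa using hpre)]
  -- B's side
  rw [foldl_count ks.reverse [] 1]
  simp only [List.nil_append, List.length_reverse]
  rw [zip_reverse ks.reverse _ (by rw [List.length_reverse, PySem.List.length_pyRange_one]; omega)]
  rw [List.reverse_reverse]
  have hcd : (PySem.List.pyRange 1 (1 + (ks.length : Int)) 1).reverse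
      = PySem.List.pyRange (ks.length : Int) 0 (-1) := by
    rw [PySem.List.pyRange_neg_one_eq_reverse]
    norm_num
    rw [show (1 : Int) + (ks.length : Int) = (ks.length : Int) + 1 from by ring]
  rw [hcd]
  -- dict() of a pair list with distinct keys has exactly those items
  rw [show PySem.Dict.ofList (ks.zip (PySem.List.pyRange (ks.length : Int) 0 (-1)))
      = (ks.zip (PySem.List.pyRange (ks.length : Int) 0 (-1))).foldl
          (fun d p => d.insert p.1 p.2) PySem.Dict.empty from rfl]
  rw [items_fold ks _ PySem.Dict.empty hrlen
      (by rw [PySem.Dict.keys_empty]; simpa using hpre)]
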